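-- pv_equiv track=rewrite | github.com/pedrowemanuel/projeto_logica_computacao | auxiliary_functions.py | separar_dados
-- ===== SOURCE A (Python) =====
-- def separar_dados(dados):
--
--     atributos = []
--     pacientes_com_patologia = []
--     pacientes_sem_patologia = []
--
--     for linha in range(len(dados)):
--
--         quantidade_de_colunas = len(dados[linha])
--         dados_paciente = []
--
--         for coluna in range(quantidade_de_colunas):
--             if linha == 0:
--                 if coluna < (quantidade_de_colunas - 1):
--                     atributos.append(dados[linha][coluna])
--             else:
--                 if coluna == (quantidade_de_colunas - 1):
--                     dados_paciente.append(int(dados[linha][coluna].replace("\n","")))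
--                 else:
--                     dados_paciente.append(int(dados[linha][coluna]))
--
--         if dados_paciente != []:
--             if dados_paciente[quantidade_de_colunas - 1] == 0:
--                 dados_paciente.pop()
--                 pacientes_sem_patologia.append(dados_paciente)
--             elif dados_paciente[quantidade_de_colunas - 1] == 1:
--                 dados_paciente.pop()
--                 pacientes_com_patologia.append(dados_paciente)
--     return [atributos, pacientes_com_patologia, pacientes_sem_patologia]
-- ===== SOURCE B (Python) =====
-- def separar_dados(dados):
--     if not dados:
--         return [[], [], []]
--     atributos = dados[0][:-1]
--     pacientes_com_patologia = []
--     pacientes_sem_patologia = []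
--     for row in dados[1:]:
--         if not row:
--             continue
--         valores = [int(c) for c in row[:-1]]
--         rotulo = int(row[-1].replace("\n", ""))
--         if rotulo == 1:
--             pacientes_com_patologia.append(valores)
--         elif rotulo == 0:
--             pacientes_sem_patologia.append(valores)
--     return [atributos, pacientes_com_patologia, pacientes_sem_patologia]
-- ===== Notes on version B (the rewrite author's own statement) =====
-- stated objective: simpler
-- what changed: B handles the header row once by slicing dados[0][:-1] instead of branching on linha==0 inside a double index loop, and parses each data row by a comprehension over row[:-1] plus a separate label read, replacing A's per-column index comparisons and the build-then-pop of the label.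
import Mathlib
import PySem

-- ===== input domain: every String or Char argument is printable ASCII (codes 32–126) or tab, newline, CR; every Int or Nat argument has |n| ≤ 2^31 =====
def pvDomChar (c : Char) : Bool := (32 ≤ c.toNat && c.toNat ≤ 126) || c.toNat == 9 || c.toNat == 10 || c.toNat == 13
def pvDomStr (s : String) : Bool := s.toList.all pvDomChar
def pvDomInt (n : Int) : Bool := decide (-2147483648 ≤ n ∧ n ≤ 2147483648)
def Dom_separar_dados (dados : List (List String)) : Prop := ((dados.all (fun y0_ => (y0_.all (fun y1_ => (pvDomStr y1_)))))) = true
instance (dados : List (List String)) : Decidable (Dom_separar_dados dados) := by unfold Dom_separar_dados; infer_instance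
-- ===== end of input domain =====

-- B handles the header row by slicing dados[0][:-1] once and iterates only the data rows,
-- parsing each row with a comprehension over row[:-1] plus a separate label read — a simpler
-- decomposition than A's index-driven double loop; same return value (equivalence proved below).


-- int(cell); Pre_ guarantees isSome, so the .getD 0 default is never the value Python lacks
def pvParse (c : String) : Int := (PySem.Int.ofStr? c).getD 0

-- int(cell.replace("\n",""))
def pvParseLast (c : String) : Int :=
  (PySem.Int.ofStr? (PySem.Str.replace c "\n" "")).getD 0

-- ===== PORT A =====
-- body of A's inner `for coluna in range(quantidade_de_colunas)` loop, state (atributos, dados_paciente)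
def pvInnerA (linha q : Int) (pr : List String × List Int) (cp : Int × String) :
    List String × List Int :=
  if linha = 0 then
    if cp.1 < q - 1 then (pr.1 ++ [cp.2], pr.2) else pr
  else
    if cp.1 = q - 1 then (pr.1, pr.2 ++ [pvParseLast cp.2])
    else (pr.1, pr.2 ++ [pvParse cp.2])

-- body of A's outer `for linha in range(len(dados))` loop, state (atributos, com, sem)
def pvStepA (st : List String × List (List Int) × List (List Int)) (p : Int × List String) :
    List String × List (List Int) × List (List Int) :=
  let linha := p.1
  let row := p.2
  let q : Int := (row.length : Int)
  let inner := (PySem.List.enumerate row).foldl (pvInnerA linha q) (st.1, [])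
  let atributos := inner.1
  let dp := inner.2
  if dp ≠ [] then
    -- dados_paciente[q-1]: in range whenever dp ≠ [] (dp has one entry per column)
    if (PySem.List.pyGet? dp (q - 1)).getD 0 = 0 then
      (atributos, st.2.1, st.2.2 ++ [dp.dropLast])
    else if (PySem.List.pyGet? dp (q - 1)).getD 0 = 1 then
      (atributos, st.2.1 ++ [dp.dropLast], st.2.2)
    else (atributos, st.2.1, st.2.2)
  else (atributos, st.2.1, st.2.2)

def separar_dados (dados : List (List String)) :
    List String × List (List Int) × List (List Int) :=
  (PySem.List.enumerate dados).foldl pvStepA ([], [], [])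

-- ===== PORT B =====
-- body of B's `for row in dados[1:]` loop, state (com, sem)
def pvStepB (p : List (List Int) × List (List Int)) (row : List String) :
    List (List Int) × List (List Int) :=
  if row = [] then p
  else
    let valores := row.dropLast.map pvParse          -- [int(c) for c in row[:-1]]
    let rotulo := pvParseLast ((PySem.List.pyGet? row (-1)).getD "")  -- row[-1]: row ≠ []
    if rotulo = 1 then (p.1 ++ [valores], p.2)
    else if rotulo = 0 then (p.1, p.2 ++ [valores])
    else p

def separar_dados_alt (dados : List (List String)) :
    List String × List (List Int) × List (List Int) :=
  match dados with
  | [] => ([], [], [])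
  | first :: rest =>
      let res := rest.foldl pvStepB ([], [])
      (first.dropLast, res.1, res.2)   -- dados[0][:-1]

-- ===== PRECONDITION & SPEC =====
-- Pre_ excludes exactly the inputs where Python A raises ValueError: a data row (all rows after
-- the first) containing a cell int() cannot parse (the last cell is parsed after "\n"-removal).
def Pre_separar_dados (dados : List (List String)) : Prop :=
  ∀ row ∈ dados.drop 1,
    (∀ c ∈ row.dropLast, (PySem.Int.ofStr? c).isSome = true) ∧
    (∀ c ∈ row.drop (row.length - 1),
      (PySem.Int.ofStr? (PySem.Str.replace c "\n" "")).isSome = true)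
instance (dados : List (List String)) : Decidable (Pre_separar_dados dados) := by
  unfold Pre_separar_dados; infer_instance

def pvWitness_separar_dados : List (List String) :=
  [["idade", "peso", "classe"], ["1", "2", "1\n"], ["3", "4", "0"], ["5", "6", "2"]]

def Spec_separar_dados (dados : List (List String)) (out : List String × List (List Int) × List (List Int)) : Prop := out = separar_dados_alt dados
instance (dados : List (List String)) (out : List String × List (List Int) × List (List Int)) : Decidable (Spec_separar_dados dados out) := by unfold Spec_separar_dados; infer_instance

-- ===== CLAIM (what is proved, stated in full; the proofs are below) =====
def Claim_equal_separar_dados : Prop := ∀ (dados : List (List String)), Dom_separar_dados dados → Pre_separar_dados dados → Spec_separar_dados dados (separar_dados dados)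

-- ===== LEMMAS AND PROOFS =====

-- header row: the inner loop with linha = 0 appends the cells whose column index is < q - 1
lemma pvInnerA_zero (q : Int) (row : List String) :
    ∀ (s : Int) (ats : List String) (dp : List Int),
      (PySem.List.enumerate row s).foldl (pvInnerA 0 q) (ats, dp) =
        (ats ++ row.take (q - 1 - s).toNat, dp) := by
  induction row with
  | nil => intro s ats dp; simp [PySem.List.enumerate_nil]
  | cons c rest ih =>
      intro s ats dp
      rw [PySem.List.enumerate_cons, List.foldl_cons]
      by_cases h : s < q - 1
      · have hstep : pvInnerA 0 q (ats, dp) (s, c) = (ats ++ [c], dp) := by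
          simp [pvInnerA, h]
        rw [hstep, ih (s + 1) (ats ++ [c]) dp]
        have h1 : (q - 1 - s).toNat = (q - 1 - (s + 1)).toNat + 1 := by omega
        rw [h1]
        simp [List.take_succ_cons]
      · have hstep : pvInnerA 0 q (ats, dp) (s, c) = (ats, dp) := by
          simp [pvInnerA, h]
        rw [hstep, ih (s + 1) ats dp]
        have h1 : (q - 1 - s).toNat = 0 := by omega
        have h2 : (q - 1 - (s + 1)).toNat = 0 := by omega
        rw [h1, h2]
        simp

-- what A's inner loop parses out of a data row: every cell with pvParse, the last with pvParseLast
def pvParseRow : List String → List Int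
  | [] => []
  | [c] => [pvParseLast c]
  | c :: c2 :: rest => pvParse c :: pvParseRow (c2 :: rest)

lemma pvParseRow_concat (ys : List String) (c : String) :
    pvParseRow (ys ++ [c]) = ys.map pvParse ++ [pvParseLast c] := by
  induction ys with
  | nil => simp [pvParseRow]
  | cons y ys ih =>
      cases ys with
      | nil => simp [pvParseRow]
      | cons y2 ys' => simp [pvParseRow] at ih ⊢; exact ih

-- data row: the inner loop with linha ≠ 0 appends pvParseRow of the row to dados_paciente
lemma pvInnerA_pos (linha q : Int) (h : linha ≠ 0) (row : List String) :
    ∀ (s : Int) (ats : List String) (dp : List Int), s + row.length = q →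
      (PySem.List.enumerate row s).foldl (pvInnerA linha q) (ats, dp) =
        (ats, dp ++ pvParseRow row) := by
  induction row with
  | nil => intro s ats dp _; simp [PySem.List.enumerate_nil, pvParseRow]
  | cons c rest ih =>
      intro s ats dp hq
      rw [PySem.List.enumerate_cons, List.foldl_cons]
      cases rest with
      | nil =>
          have hk : s = q - 1 := by simp at hq; omega
          have hstep : pvInnerA linha q (ats, dp) (s, c) = (ats, dp ++ [pvParseLast c]) := by
            simp [pvInnerA, h, hk]
          rw [hstep]
          simp [PySem.List.enumerate_nil, pvParseRow]
      | cons c2 rest' =>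
          have hk : s ≠ q - 1 := by simp at hq; omega
          have hstep : pvInnerA linha q (ats, dp) (s, c) = (ats, dp ++ [pvParse c]) := by
            simp [pvInnerA, h, hk]
          rw [hstep, ih (s + 1) ats (dp ++ [pvParse c]) (by simp at hq ⊢; omega)]
          simp [pvParseRow]

lemma pvStepA_zero (st : List String × List (List Int) × List (List Int)) (row : List String) :
    pvStepA st (0, row) = (st.1 ++ row.dropLast, st.2.1, st.2.2) := by
  simp only [pvStepA]
  rw [pvInnerA_zero (row.length : Int) row 0 st.1 []]
  have h1 : ((row.length : Int) - 1 - 0).toNat = row.length - 1 := by omega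
  rw [h1, ← List.dropLast_eq_take]
  simp

lemma pvStepA_pos (st : List String × List (List Int) × List (List Int))
    (linha : Int) (h : linha ≠ 0) (row : List String) :
    pvStepA st (linha, row) = (st.1, pvStepB (st.2.1, st.2.2) row) := by
  simp only [pvStepA]
  rw [pvInnerA_pos linha (row.length : Int) h row 0 st.1 [] (by simp)]
  rcases List.eq_nil_or_concat row with hrow | ⟨ys, c, hrow⟩
  · subst hrow; simp [pvParseRow, pvStepB]
  · subst hrow
    simp only [List.concat_eq_append]
    rw [pvParseRow_concat]
    have hne : ([] : List Int) ++ (ys.map pvParse ++ [pvParseLast c]) ≠ [] := by simp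
    have hget : (PySem.List.pyGet? ([] ++ (ys.map pvParse ++ [pvParseLast c]))
        (((ys ++ [c]).length : Int) - 1)).getD 0 = pvParseLast c := by
      simp only [List.nil_append, List.length_append, List.length_singleton]
      have : ((ys.length + 1 : Nat) : Int) - 1 = (ys.length : Int) := by push_cast; ring
      rw [this]
      rw [PySem.List.pyGet?_natCast]
      simp
    have hgetB : (PySem.List.pyGet? (ys ++ [c]) (-1)).getD "" = c := by
      rw [PySem.List.pyGet?_neg_one]; simp
    simp only [hne, ite_not, hget]
    simp only [pvStepB, List.append_eq_nil_iff, hgetB]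
    have hdrop : (ys ++ [c]).dropLast = ys := by simp
    by_cases h0 : pvParseLast c = 0
    · simp [h0, hdrop]
    · by_cases h1 : pvParseLast c = 1
      · simp [h1]
      · simp [h0, h1]

lemma pv_tail_loop (rest : List (List String)) :
    ∀ (s : Int), 1 ≤ s → ∀ (ats : List String) (com sem : List (List Int)),
      (PySem.List.enumerate rest s).foldl pvStepA (ats, com, sem) =
        (ats, rest.foldl pvStepB (com, sem)) := by
  induction rest with
  | nil => intro s _ ats com sem; simp [PySem.List.enumerate_nil]
  | cons r rest ih =>
      intro s hs ats com sem
      rw [PySem.List.enumerate_cons, List.foldl_cons, List.foldl_cons,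
          pvStepA_pos (ats, com, sem) s (by omega) r]
      exact ih (s + 1) (by omega) ats (pvStepB (com, sem) r).1 (pvStepB (com, sem) r).2

-- ===== VERDICT (by name: the statement is the Claim_ definition above) =====
theorem separar_dados_spec : Claim_equal_separar_dados := by
  intro dados _ _
  unfold Spec_separar_dados separar_dados separar_dados_alt
  cases dados with
  | nil => simp [PySem.List.enumerate_nil]
  | cons first rest =>
      rw [PySem.List.enumerate_cons, List.foldl_cons, pvStepA_zero ([], [], []) first]
      simp only [List.nil_append, zero_add]
      rw [pv_tail_loop rest 1 (by omega) first.dropLast [] []]
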